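-- pv_equiv track=rewrite | github.com/akikuno/DAJIN2 | src/DAJIN2/core/preprocess/generate_insertion_fasta.py | subset_sequences
-- ===== SOURCE A (Python) =====
-- from itertools import groupby
--
-- def subset_sequences(sequences, labels, num=1000) -> list[dict]:
--     """
--     Downsampling to the required number of sequences when there is a huge number of inserted sequences
--     """
--     sequences_subset = []
--     tmp_sequences = []
--     for sequence, label in zip(sequences, labels):
--         tmp_sequences.append({"CSSPLIT": sequence, "LABEL": label})
--     tmp_sequences.sort(key=lambda x: x["LABEL"])
--     for _, group in groupby(tmp_sequences, key=lambda x: x["LABEL"]):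
--         sequences_subset.extend(list(group)[:num])
--     return sequences_subset
-- ===== SOURCE B (Python) =====
-- def subset_sequences(sequences, labels, num=1000):
--     """
--     Downsampling to the required number of sequences when there is a huge number of inserted sequences
--     """
--     buckets = {}
--     for sequence, label in zip(sequences, labels):
--         buckets.setdefault(label, []).append({"CSSPLIT": sequence, "LABEL": label})
--     sequences_subset = []
--     for label in sorted(buckets):
--         sequences_subset.extend(buckets[label][:num])
--     return sequences_subset
-- ===== Notes on version B (the rewrite author's own statement) =====
-- stated objective: alternative
-- what changed: Instead of building all records, stable-sorting the whole record list by label and running itertools.groupby, B buckets the records per label in one dict pass and then sorts only the distinct labels, concatenating each bucket's first num records (measured only ~1.2x faster at the largest size, so no speed claim).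
import Mathlib
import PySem

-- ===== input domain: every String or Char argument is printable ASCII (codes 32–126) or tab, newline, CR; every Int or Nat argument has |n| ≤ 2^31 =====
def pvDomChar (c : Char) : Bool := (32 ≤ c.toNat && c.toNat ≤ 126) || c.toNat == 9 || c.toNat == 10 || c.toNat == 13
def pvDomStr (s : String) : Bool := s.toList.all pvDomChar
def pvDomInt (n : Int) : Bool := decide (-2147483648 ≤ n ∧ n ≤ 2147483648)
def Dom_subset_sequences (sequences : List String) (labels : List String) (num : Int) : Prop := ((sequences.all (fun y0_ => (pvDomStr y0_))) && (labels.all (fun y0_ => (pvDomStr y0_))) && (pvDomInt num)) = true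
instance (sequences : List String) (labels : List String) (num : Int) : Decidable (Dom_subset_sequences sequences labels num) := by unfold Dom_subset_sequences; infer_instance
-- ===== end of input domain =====

-- B replaces A's sort-everything-then-groupby with one bucketing pass over a dict keyed by label
-- followed by a sort of the distinct labels only; the return value is proved identical.

-- ===== PORT A =====
-- x["LABEL"] of A's sort key; on every dict A builds the key "LABEL" is present, so get? never misses (exact).
def pvKeyA (x : List (String × String)) : String := ((PySem.Dict.mk x).get? "LABEL").getD ""

-- itertools.groupby(·, key): the list of maximal runs of equal key, left to right.
def pvRuns {α : Type} (key : α → String) : List α → List (List α)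
  | [] => []
  | x :: xs =>
    match pvRuns key xs with
    | [] => [[x]]
    | [] :: gs => [x] :: gs
    | (y :: g) :: gs => if key x == key y then (x :: y :: g) :: gs else [x] :: (y :: g) :: gs

def subset_sequences (sequences : List String) (labels : List String) (num : Int) : List (List (String × String)) :=
  let tmp_sequences := (sequences.zip labels).foldl
    (fun acc sl => acc ++ [[("CSSPLIT", sl.1), ("LABEL", sl.2)]]) []
  let tmp_sorted := PySem.List.sorted tmp_sequences pvKeyA false
  (pvRuns pvKeyA tmp_sorted).foldl
    (fun acc g => acc ++ PySem.List.slice g none (some num)) []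

-- ===== PORT B =====
def subset_sequences_alt (sequences : List String) (labels : List String) (num : Int) : List (List (String × String)) :=
  let buckets := (sequences.zip labels).foldl
    (fun d sl => d.modify sl.2 [] (fun v => v ++ [[("CSSPLIT", sl.1), ("LABEL", sl.2)]]))
    PySem.Dict.empty
  (PySem.List.sorted buckets.keys (fun k => k) false).foldl
    (fun acc k => acc ++ PySem.List.slice (buckets.getD k []) none (some num)) []

-- ===== PRECONDITION & SPEC =====
def Spec_subset_sequences (sequences : List String) (labels : List String) (num : Int) (out : List (List (String × String))) : Prop := out = subset_sequences_alt sequences labels num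
instance (sequences : List String) (labels : List String) (num : Int) (out : List (List (String × String))) : Decidable (Spec_subset_sequences sequences labels num out) := by unfold Spec_subset_sequences; infer_instance

-- ===== CLAIM (what is proved, stated in full; the proofs are below) =====
def Claim_equal_subset_sequences : Prop := ∀ (sequences : List String) (labels : List String) (num : Int), Dom_subset_sequences sequences labels num → Spec_subset_sequences sequences labels num (subset_sequences sequences labels num)

-- ===== LEMMAS AND PROOFS =====

-- the record built for the pair (sequence, label)
def pvItem (sl : String × String) : List (String × String) := [("CSSPLIT", sl.1), ("LABEL", sl.2)]

theorem pvKeyA_item (sl : String × String) : pvKeyA (pvItem sl) = sl.2 := by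
  simp [pvKeyA, pvItem, PySem.Dict.get?_mk_cons]

-- concatenation of the per-key blocks of xs, keys taken from K
def pvGather {α : Type} (key : α → String) (K : List String) (xs : List α) : List α :=
  K.flatMap (fun k => xs.filter (fun a => key a == k))

-- ordered insertion of a key into a sorted key list (no-op if present)
def pvInsKey (k : String) : List String → List String
  | [] => [k]
  | k0 :: K => if k < k0 then k :: k0 :: K else if k = k0 then k0 :: K else k0 :: pvInsKey k K

theorem pv_foldl_append {β γ : Type} (g : β → List γ) :
    ∀ (l : List β) (acc : List γ), l.foldl (fun a x => a ++ g x) acc = acc ++ l.flatMap g := by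
  intro l
  induction l with
  | nil => simp
  | cons x t ih => intro acc; simp [List.foldl_cons, ih]

theorem pv_insertBy_all_lt {α : Type} (key : α → String) (x : α) (ys : List α)
    (h : ∀ y ∈ ys, key x < key y) :
    PySem.List.insertBy (fun a b => decide (key a < key b)) x ys = x :: ys := by
  cases ys with
  | nil => rfl
  | cons y t => simp [PySem.List.insertBy, h y (by simp)]

theorem pv_insertBy_append_not {α : Type} (key : α → String) (x : α) (ys zs : List α)
    (h : ∀ y ∈ ys, ¬ key x < key y) :
    PySem.List.insertBy (fun a b => decide (key a < key b)) x (ys ++ zs)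
      = ys ++ PySem.List.insertBy (fun a b => decide (key a < key b)) x zs := by
  induction ys with
  | nil => rfl
  | cons y t ih =>
    simp only [List.cons_append, PySem.List.insertBy]
    rw [if_neg (by simp [h y (by simp)]), ih (fun y hy => h y (by simp [hy]))]

theorem pv_mem_insKey (k y : String) (K : List String) : y ∈ pvInsKey k K ↔ y = k ∨ y ∈ K := by
  induction K with
  | nil => simp [pvInsKey]
  | cons k0 K ih =>
    by_cases h1 : k < k0
    · simp [pvInsKey, h1]
    · by_cases h2 : k = k0
      · subst h2; simp [pvInsKey]
      · simp [pvInsKey, h1, h2, ih]; tauto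

theorem pv_gather_append_ne {α : Type} (key : α → String) (K : List String) (xs : List α) (x : α)
    (h : ∀ k ∈ K, k ≠ key x) :
    pvGather key K (xs ++ [x]) = pvGather key K xs := by
  induction K with
  | nil => rfl
  | cons k0 K ih =>
    simp only [pvGather, List.flatMap_cons] at *
    rw [List.filter_append, ih (fun k hk => h k (by simp [hk]))]
    have : (key x == k0) = false := by
      simp only [beq_eq_false_iff_ne, ne_eq]
      exact fun hc => h k0 (by simp) hc.symm
    simp [this]

theorem pv_gather_key_mem {α : Type} (key : α → String) (K : List String) (xs : List α)
    (y : α) (hy : y ∈ pvGather key K xs) : key y ∈ K := by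
  simp only [pvGather, List.mem_flatMap, List.mem_filter] at hy
  obtain ⟨k, hk, _, hbeq⟩ := hy
  rw [beq_iff_eq] at hbeq
  exact hbeq ▸ hk

theorem pv_filter_key_nil {α : Type} (key : α → String) (xs : List α) (K : List String) (x : α)
    (h2 : (∃ a ∈ xs, key a = key x) → key x ∈ K)
    (hup : ∀ k ∈ K, key x < k) :
    xs.filter (fun a => key a == key x) = [] := by
  rw [List.filter_eq_nil_iff]
  intro a ha hc
  rw [beq_iff_eq] at hc
  exact absurd (hup _ (h2 ⟨a, ha, hc⟩)) (lt_irrefl _)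

theorem pv_gather_insert {α : Type} (key : α → String) (x : α) (xs : List α) (K : List String)
    (h1 : K.Pairwise (· < ·))
    (h2 : (∃ a ∈ xs, key a = key x) → key x ∈ K) :
    PySem.List.insertBy (fun a b => decide (key a < key b)) x (pvGather key K xs)
      = pvGather key (pvInsKey (key x) K) (xs ++ [x]) := by
  induction K generalizing xs with
  | nil =>
    have hfil : xs.filter (fun a => key a == key x) = [] :=
      pv_filter_key_nil key xs [] x h2 (by simp)
    simp [pvGather, pvInsKey, PySem.List.insertBy, List.filter_append, hfil]
  | cons k0 K ih =>
    rcases List.pairwise_cons.mp h1 with ⟨hk0, htail⟩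
    have hgcons : ∀ (k : String) (Ks : List String) (ys : List α), pvGather key (k :: Ks) ys
        = ys.filter (fun a => key a == k) ++ pvGather key Ks ys := by
      intro k Ks ys; simp [pvGather]
    rcases lt_trichotomy (key x) k0 with hlt | heq | hgt
    · -- key x smaller than every key in k0 :: K: x opens a fresh first block
      have hup : ∀ k ∈ k0 :: K, key x < k := by
        intro k hk
        rcases List.mem_cons.mp hk with rfl | hk
        · exact hlt
        · exact lt_trans hlt (hk0 _ hk)
      rw [pv_insertBy_all_lt key x _ (fun y hy =>
        hup _ (pv_gather_key_mem key _ xs y hy))]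
      have hins : pvInsKey (key x) (k0 :: K) = key x :: k0 :: K := by
        simp [pvInsKey, hlt]
      rw [hins, hgcons (key x) (k0 :: K) (xs ++ [x]), pv_gather_append_ne key (k0 :: K) xs x
        (fun k hk => ne_of_gt (hup _ hk))]
      have hfilxs : xs.filter (fun a => key a == key x) = [] :=
        pv_filter_key_nil key xs (k0 :: K) x h2 hup
      simp [List.filter_append, hfilxs]
    · -- key x = k0: x is appended at the end of the k0 block
      have hblock : ∀ y ∈ xs.filter (fun a => key a == k0), ¬ key x < key y := by
        intro y hy
        rw [List.mem_filter, beq_iff_eq] at hy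
        rw [hy.2, heq]; exact lt_irrefl _
      rw [hgcons k0 K xs, pv_insertBy_append_not key x _ _ hblock,
        pv_insertBy_all_lt key x _ (fun y hy => by
          rw [heq]; exact hk0 _ (pv_gather_key_mem key _ xs y hy))]
      have hins : pvInsKey (key x) (k0 :: K) = k0 :: K := by
        simp [pvInsKey, heq]
      rw [hins, hgcons k0 K (xs ++ [x]), pv_gather_append_ne key K xs x
        (fun k hk => ne_of_gt (heq ▸ hk0 _ hk)), List.filter_append]
      have : (key x == k0) = true := by rw [beq_iff_eq]; exact heq
      simp [this]
    · -- key x greater than k0: the k0 block is passed over unchanged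
      have hblock : ∀ y ∈ xs.filter (fun a => key a == k0), ¬ key x < key y := by
        intro y hy
        rw [List.mem_filter, beq_iff_eq] at hy
        rw [hy.2]; exact fun hc => absurd (lt_trans hgt hc) (lt_irrefl _)
      have h2' : (∃ a ∈ xs, key a = key x) → key x ∈ K := by
        intro he
        rcases List.mem_cons.mp (h2 he) with hq | hq
        · exact absurd hq (ne_of_gt hgt)
        · exact hq
      rw [hgcons k0 K xs, pv_insertBy_append_not key x _ _ hblock, ih xs htail h2']
      have hins : pvInsKey (key x) (k0 :: K) = k0 :: pvInsKey (key x) K := by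
        simp [pvInsKey, not_lt_of_gt hgt, ne_of_gt hgt]
      rw [hins, hgcons k0 (pvInsKey (key x) K) (xs ++ [x]), List.filter_append]
      have : (key x == k0) = false := by rw [beq_eq_false_iff_ne]; exact ne_of_gt hgt
      simp [this]

theorem pv_insKey_of_mem (k : String) (K : List String)
    (h1 : K.Pairwise (· < ·)) (hm : k ∈ K) : pvInsKey k K = K := by
  induction K with
  | nil => cases hm
  | cons k0 K ih =>
    rcases List.pairwise_cons.mp h1 with ⟨hk0, htail⟩
    rcases List.mem_cons.mp hm with rfl | hm'
    · simp [pvInsKey]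
    · have hgt : k0 < k := hk0 _ hm'
      simp [pvInsKey, not_lt_of_gt hgt, ih htail hm']

theorem pv_insKey_perm (k : String) (K : List String) (hm : k ∉ K) :
    (pvInsKey k K).Perm (k :: K) := by
  induction K with
  | nil => simp [pvInsKey]
  | cons k0 K ih =>
    have hm' : k ∉ K := fun hc => hm (by simp [hc])
    have hne : k ≠ k0 := fun hc => hm (by simp [hc])
    by_cases hlt : k < k0
    · simp [pvInsKey, hlt]
    · refine List.Perm.trans ?_ (List.Perm.swap k k0 K)
      simp only [pvInsKey, if_neg hlt, if_neg hne]
      exact (ih hm').cons k0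

theorem pv_insKey_pairwise (k : String) (K : List String)
    (h1 : K.Pairwise (· < ·)) (hm : k ∉ K) : (pvInsKey k K).Pairwise (· < ·) := by
  induction K with
  | nil => simp [pvInsKey]
  | cons k0 K ih =>
    rcases List.pairwise_cons.mp h1 with ⟨hk0, htail⟩
    have hm' : k ∉ K := fun hc => hm (by simp [hc])
    have hne : k ≠ k0 := fun hc => hm (by simp [hc])
    by_cases hlt : k < k0
    · rw [show pvInsKey k (k0 :: K) = k :: k0 :: K from by simp [pvInsKey, hlt]]
      refine List.pairwise_cons.mpr ⟨?_, h1⟩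
      intro a ha
      rcases List.mem_cons.mp ha with rfl | ha'
      · exact hlt
      · exact lt_trans hlt (hk0 _ ha')
    · have hgt : k0 < k := lt_of_le_of_ne (not_lt.mp hlt) (Ne.symm hne)
      rw [show pvInsKey k (k0 :: K) = k0 :: pvInsKey k K from by simp [pvInsKey, hlt, hne]]
      refine List.pairwise_cons.mpr ⟨?_, ih htail hm'⟩
      intro a ha
      rcases (pv_mem_insKey k a K).mp ha with rfl | ha'
      · exact hgt
      · exact hk0 _ ha'

theorem pv_insKey_sorted (l : List String) (k : String) :
    pvInsKey k (PySem.List.sorted (PySem.Set.ofList l) (fun x => x) false)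
      = PySem.List.sorted (PySem.Set.ofList (l ++ [k])) (fun x => x) false := by
  have hofl : PySem.Set.ofList (l ++ [k]) = PySem.Set.add (PySem.Set.ofList l) k := by
    simp [PySem.Set.ofList, List.foldl_append]
  have hK1 := PySem.List.sorted_ofList_pairwise_lt (κ := String) l
  by_cases hm : k ∈ PySem.Set.ofList l
  · have hm' : k ∈ l := (PySem.Set.mem_ofList _ _).mp hm
    have hadd : PySem.Set.add (PySem.Set.ofList l) k = PySem.Set.ofList l := by
      simp [PySem.Set.add, hm']
    rw [hofl, hadd]
    exact pv_insKey_of_mem k _ hK1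
      ((PySem.List.mem_sorted _ _ _ _).mpr hm)
  · have hm' : k ∉ l := fun hc => hm ((PySem.Set.mem_ofList _ _).mpr hc)
    have hadd : PySem.Set.add (PySem.Set.ofList l) k = PySem.Set.ofList l ++ [k] := by
      simp [PySem.Set.add, hm']
    rw [hofl, hadd]
    have hmK : k ∉ PySem.List.sorted (PySem.Set.ofList l) (fun x => x) false := by
      rw [PySem.List.mem_sorted]; exact hm
    refine (PySem.List.sorted_eq_of_perm_of_pairwise_lt _ _ _ ?_ ?_).symm
    · exact ((pv_insKey_perm k _ hmK).trans
        ((PySem.List.sorted_perm _ _ _).cons k)).trans (List.perm_append_singleton k _).symm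
    · exact pv_insKey_pairwise k _ hK1 hmK

theorem pv_sorted_eq_gather {α : Type} (key : α → String) (xs : List α) :
    PySem.List.sorted xs key false
      = pvGather key (PySem.List.sorted (PySem.Set.ofList (xs.map key)) (fun x => x) false) xs := by
  induction xs using List.reverseRecOn with
  | nil => simp [pvGather, PySem.List.sorted]
  | append_singleton xs x ih =>
    rw [PySem.List.sorted_eq_foldl_insertBy, List.foldl_append, List.foldl_cons, List.foldl_nil,
      ← PySem.List.sorted_eq_foldl_insertBy, ih]
    rw [pv_gather_insert key x xs _ (PySem.List.sorted_ofList_pairwise_lt _)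
      (fun ⟨a, ha, hk⟩ => (PySem.List.mem_sorted _ _ _ _).mpr
        ((PySem.Set.mem_ofList _ _).mpr (List.mem_map.mpr ⟨a, ha, hk⟩)))]
    rw [pv_insKey_sorted (xs.map key) (key x)]
    simp

theorem pvRuns_cons {α : Type} (key : α → String) (x : α) (xs : List α) :
    pvRuns key (x :: xs) = match pvRuns key xs with
      | [] => [[x]]
      | [] :: gs => [x] :: gs
      | (y :: g) :: gs => if key x == key y then (x :: y :: g) :: gs else [x] :: (y :: g) :: gs := rfl

theorem pv_runs_shape {α : Type} (key : α → String) (t : List α) :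
    ∀ y : α, ∃ g gs, pvRuns key (y :: t) = (y :: g) :: gs := by
  induction t with
  | nil => intro y; exact ⟨[], [], rfl⟩
  | cons z t ih =>
    intro y
    obtain ⟨g, gs, he⟩ := ih z
    by_cases hk : key y = key z
    · refine ⟨z :: g, gs, ?_⟩
      rw [pvRuns_cons, he]; simp [hk]
    · refine ⟨[], (z :: g) :: gs, ?_⟩
      rw [pvRuns_cons, he]; simp [hk]

theorem pv_runs_block {α : Type} (key : α → String) (k : String) (rest : List α)
    (hrest : rest = [] ∨ ∃ y t, rest = y :: t ∧ key y ≠ k) :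
    ∀ (b' : List α) (a : α), key a = k → (∀ c ∈ b', key c = k) →
      pvRuns key (a :: b' ++ rest) = (a :: b') :: pvRuns key rest := by
  intro b'
  induction b' with
  | nil =>
    intro a ha _
    rcases hrest with rfl | ⟨y, t, rfl, hy⟩
    · rfl
    · obtain ⟨g, gs, he⟩ := pv_runs_shape key t y
      have hne : key a ≠ key y := by rw [ha]; exact fun hc => hy hc.symm
      simp only [List.cons_append, List.nil_append]
      rw [pvRuns_cons, he]; simp [hne]
  | cons a2 b'' ih =>
    intro a ha hc
    have hr := ih a2 (hc a2 (by simp)) (fun c hcm => hc c (by simp [hcm]))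
    have heq : key a = key a2 := by rw [ha, hc a2 (by simp)]
    simp only [List.cons_append] at hr ⊢
    rw [pvRuns_cons, hr]; simp [heq]

theorem pv_runs_gather {α : Type} (key : α → String) (K : List String) (xs : List α)
    (h1 : K.Pairwise (· < ·))
    (hne : ∀ k ∈ K, ∃ a ∈ xs, key a = k) :
    pvRuns key (pvGather key K xs) = K.map (fun k => xs.filter (fun a => key a == k)) := by
  induction K with
  | nil => rfl
  | cons k0 K ih =>
    rcases List.pairwise_cons.mp h1 with ⟨hk0, htail⟩
    have hgcons : pvGather key (k0 :: K) xs
        = xs.filter (fun a => key a == k0) ++ pvGather key K xs := by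
      simp [pvGather]
    have hfil_ne : ∀ k ∈ K ∪ [k0], xs.filter (fun a => key a == k) ≠ [] := by
      intro k hk
      have hk' : k ∈ k0 :: K := by
        rcases List.mem_union_iff.mp hk with h | h
        · exact List.mem_cons_of_mem _ h
        · simp at h; simp [h]
      obtain ⟨a, ha, hak⟩ := hne k hk'
      intro hnil
      have : a ∈ xs.filter (fun c => key c == k) :=
        List.mem_filter.mpr ⟨ha, by rw [beq_iff_eq]; exact hak⟩
      rw [hnil] at this; cases this
    obtain ⟨a0, b', hb⟩ := List.exists_cons_of_ne_nil (hfil_ne k0 (by simp))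
    have hbmem : ∀ c ∈ a0 :: b', key c = k0 := by
      intro c hcm
      have : c ∈ xs.filter (fun a => key a == k0) := hb ▸ hcm
      exact beq_iff_eq.mp (List.mem_filter.mp this).2
    have hrest : pvGather key K xs = [] ∨
        ∃ y t, pvGather key K xs = y :: t ∧ key y ≠ k0 := by
      cases hK : K with
      | nil => left; rfl
      | cons k1 K'' =>
        right
        obtain ⟨y0, t', ht⟩ := List.exists_cons_of_ne_nil
          (hfil_ne k1 (by simp [hK, List.mem_union_iff]))
        have hg1 : pvGather key (k1 :: K'') xs
            = xs.filter (fun a => key a == k1) ++ pvGather key K'' xs := by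
          simp [pvGather]
        refine ⟨y0, t' ++ pvGather key K'' xs, ?_, ?_⟩
        · rw [hg1, ht]; rfl
        · have : y0 ∈ xs.filter (fun a => key a == k1) := ht ▸ List.mem_cons_self
          rw [beq_iff_eq.mp (List.mem_filter.mp this).2]
          exact ne_of_gt (hk0 k1 (by simp [hK]))
    rw [hgcons, hb, pv_runs_block key k0 _ hrest b' a0 (hbmem a0 (by simp))
      (fun c hcm => hbmem c (by simp [hcm])), ← hb,
      ih htail (fun k hk => hne k (List.mem_cons_of_mem _ hk))]
    rfl

-- ===== VERDICT (by name: the statement is the Claim_ definition above) =====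
theorem subset_sequences_spec : Claim_equal_subset_sequences := by
  intro sequences labels num _
  unfold Spec_subset_sequences subset_sequences subset_sequences_alt
  simp only []
  set ps := sequences.zip labels with hps
  -- A's first loop builds the record list
  have hitems : (ps.foldl (fun acc sl => acc ++ [[("CSSPLIT", sl.1), ("LABEL", sl.2)]]) [])
      = ps.map pvItem := by
    rw [pv_foldl_append]
    simp only [List.nil_append]
    induction ps with
    | nil => rfl
    | cons p t ih => simp [pvItem, ih]
  -- the two key lists coincide
  have hkeymap : List.map pvKeyA (List.map pvItem ps) = List.map (fun sl => sl.2) ps := by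
    rw [List.map_map]
    exact List.map_congr_left (fun sl _ => pvKeyA_item sl)
  set K := PySem.List.sorted (PySem.Set.ofList (List.map (fun sl => sl.2) ps)) (fun x => x) false
    with hK
  have hK1 : K.Pairwise (· < ·) := PySem.List.sorted_ofList_pairwise_lt _
  have hKmem : ∀ k ∈ K, ∃ a ∈ List.map pvItem ps, pvKeyA a = k := by
    intro k hk
    have hmm : k ∈ List.map pvKeyA (List.map pvItem ps) := by
      rw [hkeymap]
      exact (PySem.Set.mem_ofList _ _).mp ((PySem.List.mem_sorted _ _ _ _).mp hk)
    obtain ⟨a, ha, hak⟩ := List.mem_map.mp hmm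
    exact ⟨a, ha, hak⟩
  -- per-label block of A's records = per-label bucket contents of B
  have hblock : ∀ k : String, List.filter (fun a => pvKeyA a == k) (List.map pvItem ps)
      = List.map pvItem (List.filter (fun sl => sl.2 == k) ps) := by
    intro k
    rw [List.filter_map]
    congr 1
  -- B's dict: keys and per-key contents
  set buckets := ps.foldl
      (fun d sl => d.modify sl.2 [] (fun v => v ++ [[("CSSPLIT", sl.1), ("LABEL", sl.2)]]))
      (PySem.Dict.empty (κ := String) (ν := List (List (String × String)))) with hbuckets
  have hfold : buckets = (List.map (fun sl => (sl.2, pvItem sl)) ps).foldl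
      (fun d p => d.modify p.1 [] (fun v => v ++ [p.2])) PySem.Dict.empty := by
    rw [hbuckets, List.foldl_map]
    simp [pvItem]
  have hkeys : buckets.keys = PySem.Set.ofList (List.map (fun sl => sl.2) ps) := by
    rw [hfold]
    have h := PySem.Dict.keys_foldl_modify_key
      (List.map (fun sl => (sl.2, pvItem sl)) ps) (fun p => p.1) ([])
      (fun _ p v => v ++ [p.2]) PySem.Dict.empty
    refine h.trans ?_
    simp only [PySem.Dict.keys_empty, List.map_map]
    rfl
  have hgetD : ∀ k : String, buckets.getD k []
      = List.map pvItem (List.filter (fun sl => sl.2 == k) ps) := by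
    intro k
    rw [hfold]
    have h := PySem.Dict.getD_foldl_modify_append
      (List.map (fun sl => (sl.2, pvItem sl)) ps) PySem.Dict.empty k
    refine h.trans ?_
    simp [List.filter_map, List.map_map, Function.comp_def]
  -- chain A's pipeline into B's
  rw [hitems, pv_sorted_eq_gather pvKeyA (List.map pvItem ps), hkeymap, ← hK,
    pv_runs_gather pvKeyA K (List.map pvItem ps) hK1 hKmem, hkeys, ← hK,
    List.foldl_map]
  simp only [hblock, hgetD]
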